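-- pv_equiv track=rewrite | github.com/DOUSHABAOLIDHONGDOU/liwenbo | hog/hog/test.py | free_bacon
-- ===== SOURCE A (Python) =====
-- FIRST_101_DIGITS_OF_PI = 31415926535897932384626433832795028841971693993751058209749445923078164062862089986280348253421170679
--
-- def free_bacon(score):
--     """Return the points scored from rolling 0 dice (Free Bacon).
--
--     score:  The opponent's current score.
--     """
--     assert score < 100, 'The game should be over.'
--     pi = FIRST_101_DIGITS_OF_PI
--
--     # Trim pi to only (score + 1) digit(s)
--     # BEGIN PROBLEM 2
--     "*** YOUR CODE HERE ***"
--     i = 0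
--     while i < 100-score:
--         pi //= 10  # 将 pi 右移一位，相当于去掉最右边的一位
--         i += 1
--     # END PROBLEM 2
--     return pi % 10 + 3
-- ===== SOURCE B (Python) =====
-- FIRST_101_DIGITS_OF_PI = 31415926535897932384626433832795028841971693993751058209749445923078164062862089986280348253421170679
--
-- def free_bacon(score):
--     """Return the points scored from rolling 0 dice (Free Bacon)."""
--     assert score < 100, 'The game should be over.'
--     return FIRST_101_DIGITS_OF_PI // 10 ** (100 - score) % 10 + 3
-- ===== Notes on version B (the rewrite author's own statement) =====
-- stated objective: simpler
-- what changed: Replaces the while-loop that strips (100-score) trailing digits one division at a time with a single closed-form expression: one integer division by 10**(100-score) followed by % 10.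
import Mathlib
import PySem

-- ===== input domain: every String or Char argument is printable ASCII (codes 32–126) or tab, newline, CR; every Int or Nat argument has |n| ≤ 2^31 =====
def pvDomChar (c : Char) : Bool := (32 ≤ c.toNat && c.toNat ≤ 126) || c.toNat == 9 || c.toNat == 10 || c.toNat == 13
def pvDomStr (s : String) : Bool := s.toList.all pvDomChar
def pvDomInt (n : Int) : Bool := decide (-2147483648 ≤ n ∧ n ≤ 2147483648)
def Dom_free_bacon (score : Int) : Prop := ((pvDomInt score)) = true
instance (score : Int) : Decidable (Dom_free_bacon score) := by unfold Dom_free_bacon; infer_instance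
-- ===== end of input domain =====

-- B replaces A's digit-stripping while-loop with one closed-form division by 10^(100-score); objective: simpler.


-- ===== PORT A =====
def pvPI : Int := 31415926535897932384626433832795028841971693993751058209749445923078164062862089986280348253421170679

-- the while-loop: 'while i < 100-score: pi //= 10; i += 1', run (100-score).toNat times
def fbLoop : Nat → Int → Int
  | 0, pi => pi
  | n + 1, pi => fbLoop n (PySem.Int.floordiv pi 10)

def free_bacon (score : Int) : Int :=
  let pi := fbLoop (100 - score).toNat pvPI
  PySem.Int.mod pi 10 + 3

-- ===== PORT B =====
def free_bacon_alt (score : Int) : Int :=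
  PySem.Int.mod (PySem.Int.floordiv pvPI (10 ^ (100 - score).toNat)) 10 + 3

-- ===== PRECONDITION & SPEC =====
-- A asserts score < 100 (AssertionError otherwise); Pre_ excludes exactly those inputs.
def Pre_free_bacon (score : Int) : Prop := score < 100
instance (score : Int) : Decidable (Pre_free_bacon score) := by unfold Pre_free_bacon; infer_instance
def pvWitness_free_bacon : Int := 42

def Spec_free_bacon (score : Int) (out : Int) : Prop := out = free_bacon_alt score
instance (score : Int) (out : Int) : Decidable (Spec_free_bacon score out) := by unfold Spec_free_bacon; infer_instance

-- ===== CLAIM (what is proved, stated in full; the proofs are below) =====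
def Claim_equal_free_bacon : Prop := ∀ (score : Int), Dom_free_bacon score → Pre_free_bacon score → Spec_free_bacon score (free_bacon score)

-- ===== LEMMAS AND PROOFS =====
theorem fbLoop_eq_floordiv_pow (n : Nat) (pi : Int) :
    fbLoop n pi = PySem.Int.floordiv pi (10 ^ n) := by
  induction n generalizing pi with
  | zero => simp [fbLoop, PySem.Int.floordiv_eq_ediv_of_pos (show (0:Int) < 10 ^ 0 by norm_num), Int.ediv_one]
  | succ n ih =>
      rw [fbLoop, ih]
      rw [PySem.Int.floordiv_eq_ediv_of_pos (show (0:Int) < 10 by norm_num),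
          PySem.Int.floordiv_eq_ediv_of_pos (show (0:Int) < 10 ^ n by positivity),
          PySem.Int.floordiv_eq_ediv_of_pos (show (0:Int) < 10 ^ (n+1) by positivity)]
      rw [Int.ediv_ediv_of_nonneg (by norm_num : (0:Int) ≤ 10)]
      ring_nf

-- ===== VERDICT (by name: the statement is the Claim_ definition above) =====
theorem free_bacon_spec : Claim_equal_free_bacon := by
  intro score _ _
  unfold Spec_free_bacon free_bacon free_bacon_alt
  rw [fbLoop_eq_floordiv_pow]
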